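-- pv_equiv track=rewrite | github.com/shellsec/gh-release-fetch | VibeCodingToolsDown/scripts/build_manifest.py | _pick_qoderwork_installers
-- ===== SOURCE A (Python) =====
-- def _pick_qoderwork_installers(hits: list[str]) -> tuple[str | None, str | None, str | None]:
--     """仅选 QoderWork 独立桌面包（与 Qoder IDE 区分）。"""
--
--     def is_work(u: str) -> bool:
--         x = u.lower()
--         return "qoderwork" in x or "qoder-work" in x or "qoder_work" in x
--
--     win = next((h for h in hits if h.lower().endswith(".exe") and is_work(h)), None)
--     mac = next((h for h in hits if h.lower().endswith(".dmg") and is_work(h)), None)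
--     lin = next((h for h in hits if is_work(h) and h.lower().endswith((".deb", ".rpm", ".appimage"))), None)
--     return win, mac, lin
-- ===== SOURCE B (Python) =====
-- def _pick_qoderwork_installers(hits: list[str]) -> tuple[str | None, str | None, str | None]:
--     """Single pass: keep first QoderWork hit per OS, lowercasing each URL once."""
--     win = mac = lin = None
--     for h in hits:
--         x = h.lower()
--         work = "qoderwork" in x or "qoder-work" in x or "qoder_work" in x
--         if not work:
--             continue
--         if win is None and x.endswith(".exe"):
--             win = h
--         if mac is None and x.endswith(".dmg"):
--             mac = h
--         if lin is None and x.endswith((".deb", ".rpm", ".appimage")):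
--             lin = h
--         if win is not None and mac is not None and lin is not None:
--             break
--     return win, mac, lin
-- ===== Notes on version B (the rewrite author's own statement) =====
-- stated objective: faster
-- what changed: Replaced A's three independent generator scans (each re-lowercasing and re-checking every URL) with one loop over hits that lowercases each URL once, filters on the QoderWork marker once, fills each still-empty slot on first match, and stops early once all three slots are filled.
import Mathlib
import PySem

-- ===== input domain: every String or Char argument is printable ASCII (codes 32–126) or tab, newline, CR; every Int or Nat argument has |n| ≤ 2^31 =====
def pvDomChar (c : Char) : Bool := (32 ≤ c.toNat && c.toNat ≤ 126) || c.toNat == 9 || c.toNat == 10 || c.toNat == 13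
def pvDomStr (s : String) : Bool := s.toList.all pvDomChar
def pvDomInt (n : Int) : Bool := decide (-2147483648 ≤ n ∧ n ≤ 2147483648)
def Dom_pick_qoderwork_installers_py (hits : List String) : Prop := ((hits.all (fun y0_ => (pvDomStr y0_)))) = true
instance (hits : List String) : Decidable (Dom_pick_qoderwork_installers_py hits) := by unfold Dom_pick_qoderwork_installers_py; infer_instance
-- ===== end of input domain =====

-- B replaces A's three full scans with one single pass that lowercases each URL once and fills
-- each still-empty OS slot on first match (early exit when all three are filled): faster by constant factor.


-- ===== PORT A =====
-- is_work(u): lowercase u and look for one of the three QoderWork markers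
def pyIsWork (u : String) : Bool :=
  let x := PySem.Str.lower u
  PySem.Str.isIn "qoderwork" x || PySem.Str.isIn "qoder-work" x || PySem.Str.isIn "qoder_work" x

-- literal port of A: three `next(...)` generator scans = three List.find? over hits
def pick_qoderwork_installers_py (hits : List String) : Option String × Option String × Option String :=
  let win := hits.find? (fun h => PySem.Str.endswith (PySem.Str.lower h) ".exe" && pyIsWork h)
  let mac := hits.find? (fun h => PySem.Str.endswith (PySem.Str.lower h) ".dmg" && pyIsWork h)
  let lin := hits.find? (fun h => pyIsWork h &&
      (PySem.Str.endswith (PySem.Str.lower h) ".deb" || PySem.Str.endswith (PySem.Str.lower h) ".rpm" ||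
       PySem.Str.endswith (PySem.Str.lower h) ".appimage"))
  (win, mac, lin)

-- ===== PORT B =====
-- single loop with state (win, mac, lin); `break` = early return when all slots are filled
def pickAltGo (win mac lin : Option String) : List String → Option String × Option String × Option String
  | [] => (win, mac, lin)
  | h :: rest =>
    let x := PySem.Str.lower h
    let work := PySem.Str.isIn "qoderwork" x || PySem.Str.isIn "qoder-work" x || PySem.Str.isIn "qoder_work" x
    if !work then pickAltGo win mac lin rest
    else
      let win' := if win.isNone && PySem.Str.endswith x ".exe" then some h else win
      let mac' := if mac.isNone && PySem.Str.endswith x ".dmg" then some h else mac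
      let lin' := if lin.isNone &&
          (PySem.Str.endswith x ".deb" || PySem.Str.endswith x ".rpm" || PySem.Str.endswith x ".appimage")
        then some h else lin
      if win'.isSome && mac'.isSome && lin'.isSome then (win', mac', lin')
      else pickAltGo win' mac' lin' rest

def pick_qoderwork_installers_py_alt (hits : List String) : Option String × Option String × Option String :=
  pickAltGo none none none hits

-- ===== PRECONDITION & SPEC =====
def Spec_pick_qoderwork_installers_py (hits : List String) (out : Option String × Option String × Option String) : Prop := out = pick_qoderwork_installers_py_alt hits
instance (hits : List String) (out : Option String × Option String × Option String) : Decidable (Spec_pick_qoderwork_installers_py hits out) := by unfold Spec_pick_qoderwork_installers_py; infer_instance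

-- ===== CLAIM (what is proved, stated in full; the proofs are below) =====
def Claim_equal_pick_qoderwork_installers_py : Prop := ∀ (hits : List String), Dom_pick_qoderwork_installers_py hits → Spec_pick_qoderwork_installers_py hits (pick_qoderwork_installers_py hits)

-- ===== LEMMAS AND PROOFS =====
def pWin (h : String) : Bool := PySem.Str.endswith (PySem.Str.lower h) ".exe" && pyIsWork h
def pMac (h : String) : Bool := PySem.Str.endswith (PySem.Str.lower h) ".dmg" && pyIsWork h
def pLin (h : String) : Bool := pyIsWork h &&
  (PySem.Str.endswith (PySem.Str.lower h) ".deb" || PySem.Str.endswith (PySem.Str.lower h) ".rpm" ||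
   PySem.Str.endswith (PySem.Str.lower h) ".appimage")

-- loop invariant: each slot is its initial value, or else the first later match
lemma pickAltGo_eq (hits : List String) : ∀ (win mac lin : Option String),
    pickAltGo win mac lin hits =
      (win.or (hits.find? pWin), mac.or (hits.find? pMac), lin.or (hits.find? pLin)) := by
  induction hits with
  | nil => intro win mac lin; simp [pickAltGo]
  | cons h rest ih =>
    intro win mac lin
    by_cases hw : pyIsWork h
    · have hwork : (PySem.Str.isIn "qoderwork" (PySem.Str.lower h) ||
          PySem.Str.isIn "qoder-work" (PySem.Str.lower h) ||
          PySem.Str.isIn "qoder_work" (PySem.Str.lower h)) = true := by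
        simpa [pyIsWork] using hw
      by_cases e1 : PySem.Str.endswith (PySem.Str.lower h) ".exe" <;>
      by_cases e2 : PySem.Str.endswith (PySem.Str.lower h) ".dmg" <;>
      by_cases e3 : (PySem.Str.endswith (PySem.Str.lower h) ".deb" ||
          PySem.Str.endswith (PySem.Str.lower h) ".rpm" ||
          PySem.Str.endswith (PySem.Str.lower h) ".appimage") = true <;>
      cases win <;> cases mac <;> cases lin <;>
        simp_all [pickAltGo, pWin, pMac, pLin, Option.or]
      all_goals (intro h1 h2 h3; rcases hwork with (hh | hh) | hh <;> simp_all)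
    · have hwork : (PySem.Str.isIn "qoderwork" (PySem.Str.lower h) ||
          PySem.Str.isIn "qoder-work" (PySem.Str.lower h) ||
          PySem.Str.isIn "qoder_work" (PySem.Str.lower h)) = false := by
        simpa [pyIsWork] using hw
      simp only [pickAltGo, hwork, Bool.not_false, if_true, List.find?_cons,
        pWin, pMac, pLin, hw, Bool.and_false, Bool.false_and]
      exact ih win mac lin

-- ===== VERDICT (by name: the statement is the Claim_ definition above) =====
theorem pick_qoderwork_installers_py_spec : Claim_equal_pick_qoderwork_installers_py := by
  intro hits _
  show _ = _
  unfold pick_qoderwork_installers_py pick_qoderwork_installers_py_alt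
  rw [pickAltGo_eq]
  rfl
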